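-- pv_equiv track=rewrite | github.com/ilambrev/freeCodeCamp-Daily-Challenges | Python_Solutions/2026_02/2026_02_21_2026_winter_games_day_16_curling.py | score_curling
-- ===== SOURCE A (Python) =====
-- def score_curling(house):
--     empty_space = "."
--     red_stone = "R"
--     yellow_stone = "Y"
--     button = "22"
--     ring_1 = ["11", "12", "13", "21", "23", "31", "32", "33"]
--     ring_2 = ["00", "01", "02", "03", "04", "10", "14", "20", "24", "30", "34", "40", "41", "42", "43", "44"]
--     red_player_scores = [0, 0, 0]
--     yellow_player_scores = [0, 0, 0]
--
--     for i in range(len(house)):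
--         for j in range(len(house[i])):
--             position = str(i) + str(j)
--             if house[i][j] == red_stone:
--                 if position == button:
--                     red_player_scores[0] += 1
--                 elif position == position in ring_1:
--                     red_player_scores[1] += 1
--                 elif position in ring_2:
--                     red_player_scores[2] += 1
--             if house[i][j] == yellow_stone:
--                 if position == button:
--                     yellow_player_scores[0] += 1
--                 elif position == position in ring_1:
--                     yellow_player_scores[1] += 1
--                 elif position in ring_2:
--                     yellow_player_scores[2] += 1
--
--     scores = 0
--
--     if red_player_scores[0] > yellow_player_scores[0]:
--         scores += red_player_scores[0]
--         if yellow_player_scores[1] == 0: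
--             scores += red_player_scores[1]
--             if yellow_player_scores[2] == 0:
--                 scores += red_player_scores[2]
--         return f"R: {scores}"
--     elif yellow_player_scores[0] > red_player_scores[0]:
--         scores += yellow_player_scores[0]
--         if red_player_scores[1] == 0:
--             scores += yellow_player_scores[1]
--             if red_player_scores[2] == 0:
--                 scores += yellow_player_scores[2]
--         return f"Y: {scores}"
--     elif red_player_scores[1] > 0 and yellow_player_scores[1] == 0:
--         scores += red_player_scores[1]
--         if yellow_player_scores[2] == 0:
--             scores += red_player_scores[2]
--         return f"R: {scores}"
--     elif yellow_player_scores[1] > 0 and red_player_scores[1] == 0: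
--         scores += yellow_player_scores[1]
--         if red_player_scores[2] == 0:
--             scores += yellow_player_scores[2]
--         return f"Y: {scores}"
--     elif red_player_scores[2] > 0 and yellow_player_scores[2] == 0:
--         scores += red_player_scores[2]
--         return f"R: {scores}"
--     elif yellow_player_scores[2] > 0 and red_player_scores[2] == 0:
--         scores += yellow_player_scores[2]
--         return f"Y: {scores}"
--
--     return "No points awarded"
-- ===== SOURCE B (Python) =====
-- # B probes the 25 fixed ring coordinates directly (O(1) reads, no grid scan) and
-- # decides the result with one symmetric helper tried for red then for yellow.
--
-- _TIER_COORDS = (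
--     ((2, 2),),
--     ((1, 1), (1, 2), (1, 3), (2, 1), (2, 3), (3, 1), (3, 2), (3, 3)),
--     ((0, 0), (0, 1), (0, 2), (0, 3), (0, 4), (1, 0), (1, 4), (2, 0), (2, 4),
--      (3, 0), (3, 4), (4, 0), (4, 1), (4, 2), (4, 3), (4, 4)),
-- )
--
--
-- def _cell(house, i, j):
--     if i < len(house) and j < len(house[i]):
--         return house[i][j]
--     return None
--
--
-- def _count(house, coords, color):
--     return sum(1 for (i, j) in coords if _cell(house, i, j) == color)
--
--
-- def _attempt(mine, theirs):
--     # starting tier at which `mine` out-positions `theirs`, if any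
--     if mine[0] > theirs[0]:
--         start = 0
--     elif mine[0] == theirs[0] and mine[1] > 0 and theirs[1] == 0:
--         start = 1
--     elif (mine[0] == theirs[0] and (mine[1] > 0) == (theirs[1] > 0)
--           and mine[2] > 0 and theirs[2] == 0):
--         start = 2
--     else:
--         return None
--     total = mine[start]
--     for t in range(start + 1, 3):
--         if theirs[t] > 0:
--             break
--         total += mine[t]
--     return total
--
--
-- def score_curling(house):
--     red = tuple(_count(house, coords, "R") for coords in _TIER_COORDS)
--     yellow = tuple(_count(house, coords, "Y") for coords in _TIER_COORDS)
--     s = _attempt(red, yellow)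
--     if s is not None:
--         return f"R: {s}"
--     s = _attempt(yellow, red)
--     if s is not None:
--         return f"Y: {s}"
--     return "No points awarded"
-- ===== Notes on version B (the rewrite author's own statement) =====
-- stated objective: faster
-- what changed: B never scans the grid: it probes the 25 fixed button/ring coordinates directly (O(1) grid reads instead of classifying every cell), and replaces A's six-branch duplicated scoring cascade with one symmetric helper tried for red then for yellow.
import Mathlib
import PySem

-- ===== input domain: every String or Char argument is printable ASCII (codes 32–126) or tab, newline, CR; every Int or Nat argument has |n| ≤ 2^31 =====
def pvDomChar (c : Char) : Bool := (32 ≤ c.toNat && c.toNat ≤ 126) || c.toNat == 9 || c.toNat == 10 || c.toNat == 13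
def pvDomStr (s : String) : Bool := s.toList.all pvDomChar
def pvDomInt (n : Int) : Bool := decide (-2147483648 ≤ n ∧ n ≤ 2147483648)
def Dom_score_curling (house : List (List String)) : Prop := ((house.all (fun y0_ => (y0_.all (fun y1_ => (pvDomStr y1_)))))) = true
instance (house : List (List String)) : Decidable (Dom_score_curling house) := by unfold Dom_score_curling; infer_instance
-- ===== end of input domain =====

-- B probes the 25 fixed ring coordinates directly instead of scanning the grid, and decides the
-- result with one symmetric helper tried for red then for yellow (objective: faster on large grids).

-- ===== PORT A =====
def scA_ring1 : List (List Char) :=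
  [['1','1'], ['1','2'], ['1','3'], ['2','1'], ['2','3'], ['3','1'], ['3','2'], ['3','3']]
def scA_ring2 : List (List Char) :=
  [['0','0'], ['0','1'], ['0','2'], ['0','3'], ['0','4'], ['1','0'], ['1','4'], ['2','0'],
   ['2','4'], ['3','0'], ['3','4'], ['4','0'], ['4','1'], ['4','2'], ['4','3'], ['4','4']]

-- one player's tally update for a stone at `pos` (button / ring_1 / ring_2 cascade);
-- `pos = pos ∧ …` is Python's chained comparison `position == position in ring_1`
def scA_bumpCascade (pos : List Char) (c : Int × Int × Int) : Int × Int × Int :=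
  if pos = ['2','2'] then (c.1 + 1, c.2.1, c.2.2)
  else if pos = pos ∧ pos ∈ scA_ring1 then (c.1, c.2.1 + 1, c.2.2)
  else if pos ∈ scA_ring2 then (c.1, c.2.1, c.2.2 + 1)
  else c

def scA_step (pos : List Char) (cell : String)
    (s : (Int × Int × Int) × (Int × Int × Int)) : (Int × Int × Int) × (Int × Int × Int) :=
  let s := if cell = "R" then (scA_bumpCascade pos s.1, s.2) else s
  if cell = "Y" then (s.1, scA_bumpCascade pos s.2) else s

def score_curling (house : List (List String)) : String :=
  let tallies :=
    (PySem.List.pyRange 0 (PySem.List.len house) 1).foldl (fun s i =>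
      let row := PySem.List.pyGetD house i []
      (PySem.List.pyRange 0 (PySem.List.len row) 1).foldl (fun s j =>
        scA_step (PySem.Int.toChars i ++ PySem.Int.toChars j) (PySem.List.pyGetD row j "") s)
        s)
      ((0, 0, 0), (0, 0, 0))
  let r := tallies.1
  let y := tallies.2
  if r.1 > y.1 then
    let scores := r.1
    let scores := if y.2.1 = 0 then
        (if y.2.2 = 0 then scores + r.2.1 + r.2.2 else scores + r.2.1)
      else scores
    "R: " ++ PySem.Int.toStr scores
  else if y.1 > r.1 then
    let scores := y.1
    let scores := if r.2.1 = 0 then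
        (if r.2.2 = 0 then scores + y.2.1 + y.2.2 else scores + y.2.1)
      else scores
    "Y: " ++ PySem.Int.toStr scores
  else if r.2.1 > 0 ∧ y.2.1 = 0 then
    let scores := if y.2.2 = 0 then r.2.1 + r.2.2 else r.2.1
    "R: " ++ PySem.Int.toStr scores
  else if y.2.1 > 0 ∧ r.2.1 = 0 then
    let scores := if r.2.2 = 0 then y.2.1 + y.2.2 else y.2.1
    "Y: " ++ PySem.Int.toStr scores
  else if r.2.2 > 0 ∧ y.2.2 = 0 then
    "R: " ++ PySem.Int.toStr r.2.2
  else if y.2.2 > 0 ∧ r.2.2 = 0 then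
    "Y: " ++ PySem.Int.toStr y.2.2
  else
    "No points awarded"

-- ===== PORT B =====
-- the fixed coordinates of the button, ring_1 and ring_2 (Source B's _TIER_COORDS)
def scB_tier0 : List (Int × Int) := [(2, 2)]
def scB_tier1 : List (Int × Int) :=
  [(1, 1), (1, 2), (1, 3), (2, 1), (2, 3), (3, 1), (3, 2), (3, 3)]
def scB_tier2 : List (Int × Int) :=
  [(0, 0), (0, 1), (0, 2), (0, 3), (0, 4), (1, 0), (1, 4), (2, 0), (2, 4),
   (3, 0), (3, 4), (4, 0), (4, 1), (4, 2), (4, 3), (4, 4)]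

-- Source B's _cell: the grid value at (i, j) when in range, else None
def scB_cell (house : List (List String)) (i j : Int) : Option String :=
  if i < PySem.List.len house then
    let row := PySem.List.pyGetD house i []
    if j < PySem.List.len row then some (PySem.List.pyGetD row j "") else none
  else none

-- Source B's _count: sum(1 for (i, j) in coords if _cell(house, i, j) == color)
def scB_count (house : List (List String)) (coords : List (Int × Int)) (color : String) : Int :=
  (coords.map (fun p => if scB_cell house p.1 p.2 = some color then (1 : Int) else 0)).sum

def scB_idx (c : Int × Int × Int) (k : Int) : Int :=
  if k = 0 then c.1 else if k = 1 then c.2.1 else c.2.2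

-- Source B's _attempt: starting tier where `mine` out-positions `theirs`, then accumulate
def scB_attempt (mine theirs : Int × Int × Int) : Option Int :=
  let start? : Option Int :=
    if mine.1 > theirs.1 then some 0
    else if mine.1 = theirs.1 ∧ mine.2.1 > 0 ∧ theirs.2.1 = 0 then some 1
    else if mine.1 = theirs.1 ∧ ((mine.2.1 > 0) ↔ (theirs.2.1 > 0)) ∧ mine.2.2 > 0 ∧ theirs.2.2 = 0 then some 2
    else none
  match start? with
  | none => none
  | some start =>
    some ((PySem.List.pyRange (start + 1) 3 1).foldl
      (fun (st : Int × Bool) t =>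
        if st.2 then st
        else if scB_idx theirs t > 0 then (st.1, true)
        else (st.1 + scB_idx mine t, st.2))
      (scB_idx mine start, false)).1

def score_curling_alt (house : List (List String)) : String :=
  let red := (scB_count house scB_tier0 "R", scB_count house scB_tier1 "R", scB_count house scB_tier2 "R")
  let yellow := (scB_count house scB_tier0 "Y", scB_count house scB_tier1 "Y", scB_count house scB_tier2 "Y")
  match scB_attempt red yellow with
  | some s => "R: " ++ PySem.Int.toStr s
  | none =>
    match scB_attempt yellow red with
    | some s => "Y: " ++ PySem.Int.toStr s
    | none => "No points awarded"

-- ===== PRECONDITION & SPEC =====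
def Spec_score_curling (house : List (List String)) (out : String) : Prop := out = score_curling_alt house
instance (house : List (List String)) (out : String) : Decidable (Spec_score_curling house out) := by unfold Spec_score_curling; infer_instance

-- ===== CLAIM =====
def Claim_equal_score_curling : Prop := ∀ (house : List (List String)), Dom_score_curling house → Spec_score_curling house (score_curling house)

-- ===== LEMMAS AND PROOFS =====

-- tier classification of a position string, as A's cascade reads it
def scTierOf (pos : List Char) : Option Nat :=
  if pos = ['2','2'] then some 0
  else if pos ∈ scA_ring1 then some 1
  else if pos ∈ scA_ring2 then some 2
  else none

def scInd (pos : List Char) (cell : String) (t : Nat) (c : String) : Int :=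
  if scTierOf pos = some t ∧ cell = c then 1 else 0

def scRowSum (i : Int) (row : List String) (t : Nat) (c : String) : Int :=
  ((PySem.List.enumerate row 0).map
    (fun q => scInd (PySem.Int.toChars i ++ PySem.Int.toChars q.1) q.2 t c)).sum

def scSum (house : List (List String)) (t : Nat) (c : String) : Int :=
  ((PySem.List.enumerate house 0).map (fun p => scRowSum p.1 p.2 t c)).sum

theorem counts_enum (house : List (List String)) :
    (PySem.List.pyRange 0 (PySem.List.len house) 1).foldl (fun s i =>
      let row := PySem.List.pyGetD house i []
      (PySem.List.pyRange 0 (PySem.List.len row) 1).foldl (fun s j =>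
        scA_step (PySem.Int.toChars i ++ PySem.Int.toChars j) (PySem.List.pyGetD row j "") s)
        s)
      ((0, 0, 0), (0, 0, 0)) =
    (PySem.List.enumerate house 0).foldl (fun s p =>
      (PySem.List.enumerate p.2 0).foldl (fun s q =>
        scA_step (PySem.Int.toChars p.1 ++ PySem.Int.toChars q.1) q.2 s) s)
      ((0, 0, 0), (0, 0, 0)) := by
  rw [PySem.List.enumerate_eq_map_pyRange house ([] : List String), List.foldl_map]
  refine PySem.List.foldl_congr_mem _ _ _ _ ?_
  intro acc i _
  rw [PySem.List.enumerate_eq_map_pyRange (PySem.List.pyGetD house i []) "", List.foldl_map]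

theorem step_char (pos : List Char) (cell : String)
    (s : (Int × Int × Int) × (Int × Int × Int)) :
    scA_step pos cell s =
      ((s.1.1 + scInd pos cell 0 "R", s.1.2.1 + scInd pos cell 1 "R", s.1.2.2 + scInd pos cell 2 "R"),
       (s.2.1 + scInd pos cell 0 "Y", s.2.2.1 + scInd pos cell 1 "Y", s.2.2.2 + scInd pos cell 2 "Y")) := by
  unfold scA_step scA_bumpCascade scInd scTierOf
  by_cases h0 : pos = ['2','2'] <;> by_cases h1 : pos ∈ scA_ring1 <;>
    by_cases h2 : pos ∈ scA_ring2 <;>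
    by_cases hR : cell = "R" <;> by_cases hY : cell = "Y" <;>
    simp_all

theorem foldl_add6 {α : Type} (g1 g2 g3 g4 g5 g6 : α → Int) (l : List α)
    (s : (Int × Int × Int) × (Int × Int × Int)) :
    l.foldl (fun s x =>
      ((s.1.1 + g1 x, s.1.2.1 + g2 x, s.1.2.2 + g3 x),
       (s.2.1 + g4 x, s.2.2.1 + g5 x, s.2.2.2 + g6 x))) s =
    ((s.1.1 + (l.map g1).sum, s.1.2.1 + (l.map g2).sum, s.1.2.2 + (l.map g3).sum),
     (s.2.1 + (l.map g4).sum, s.2.2.1 + (l.map g5).sum, s.2.2.2 + (l.map g6).sum)) := by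
  induction l generalizing s with
  | nil => simp
  | cons x xs ih =>
    simp only [List.foldl_cons, List.map_cons, List.sum_cons, ih, Prod.ext_iff]
    refine ⟨⟨by omega, by omega, by omega⟩, by omega, by omega, by omega⟩

theorem tally_eq (house : List (List String)) :
    (PySem.List.enumerate house 0).foldl (fun s p =>
      (PySem.List.enumerate p.2 0).foldl (fun s q =>
        scA_step (PySem.Int.toChars p.1 ++ PySem.Int.toChars q.1) q.2 s) s)
      ((0, 0, 0), (0, 0, 0)) =
    ((scSum house 0 "R", scSum house 1 "R", scSum house 2 "R"),
     (scSum house 0 "Y", scSum house 1 "Y", scSum house 2 "Y")) := by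
  have hrow : ∀ (i : Int) (row : List String) (s : (Int × Int × Int) × (Int × Int × Int)),
      (PySem.List.enumerate row 0).foldl (fun s q =>
        scA_step (PySem.Int.toChars i ++ PySem.Int.toChars q.1) q.2 s) s =
      ((s.1.1 + scRowSum i row 0 "R", s.1.2.1 + scRowSum i row 1 "R", s.1.2.2 + scRowSum i row 2 "R"),
       (s.2.1 + scRowSum i row 0 "Y", s.2.2.1 + scRowSum i row 1 "Y", s.2.2.2 + scRowSum i row 2 "Y")) := by
    intro i row s
    rw [PySem.List.foldl_congr_mem (PySem.List.enumerate row 0)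
        (fun s q => scA_step (PySem.Int.toChars i ++ PySem.Int.toChars q.1) q.2 s)
        (fun s q =>
          ((s.1.1 + scInd (PySem.Int.toChars i ++ PySem.Int.toChars q.1) q.2 0 "R",
            s.1.2.1 + scInd (PySem.Int.toChars i ++ PySem.Int.toChars q.1) q.2 1 "R",
            s.1.2.2 + scInd (PySem.Int.toChars i ++ PySem.Int.toChars q.1) q.2 2 "R"),
           (s.2.1 + scInd (PySem.Int.toChars i ++ PySem.Int.toChars q.1) q.2 0 "Y",
            s.2.2.1 + scInd (PySem.Int.toChars i ++ PySem.Int.toChars q.1) q.2 1 "Y",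
            s.2.2.2 + scInd (PySem.Int.toChars i ++ PySem.Int.toChars q.1) q.2 2 "Y")))
        s (fun acc q _ => step_char _ q.2 acc)]
    exact foldl_add6 _ _ _ _ _ _ _ s
  rw [PySem.List.foldl_congr_mem (PySem.List.enumerate house 0)
      (fun s p => (PySem.List.enumerate p.2 0).foldl (fun s q =>
        scA_step (PySem.Int.toChars p.1 ++ PySem.Int.toChars q.1) q.2 s) s)
      (fun s p =>
        ((s.1.1 + scRowSum p.1 p.2 0 "R", s.1.2.1 + scRowSum p.1 p.2 1 "R",
          s.1.2.2 + scRowSum p.1 p.2 2 "R"),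
         (s.2.1 + scRowSum p.1 p.2 0 "Y", s.2.2.1 + scRowSum p.1 p.2 1 "Y",
          s.2.2.2 + scRowSum p.1 p.2 2 "Y")))
      ((0, 0, 0), (0, 0, 0)) (fun acc p _ => hrow p.1 p.2 acc)]
  rw [foldl_add6]
  simp [scSum]

-- ---- characterising positions built from str(i) + str(j) ----

theorem toChars_len1 (k : Nat) : 1 ≤ (PySem.Int.toChars (k : Int)).length := by
  simp [PySem.Int.toChars]
  exact Nat.length_toDigits_pos

theorem toChars_eq_toDigits (k : Nat) : PySem.Int.toChars (k : Int) = Nat.toDigits 10 k := by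
  unfold PySem.Int.toChars
  rw [if_neg (by omega : ¬ ((k : Int) < 0)), Int.toNat_natCast]

theorem toChars_len2 (k : Nat) (h : 10 ≤ k) : 2 ≤ (PySem.Int.toChars (k : Int)).length := by
  have hh := Nat.length_toDigits_le_iff (b := 10) (n := k) (k := 1) (by omega) (by omega)
  norm_num at hh
  rw [toChars_eq_toDigits]
  omega

theorem tierOf_long (pos : List Char) (h : 3 ≤ pos.length) : scTierOf pos = none := by
  have h0 : pos ≠ ['2','2'] := by intro e; subst e; simp at h
  have h1 : pos ∉ scA_ring1 := by intro hm; fin_cases hm <;> simp_all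
  have h2 : pos ∉ scA_ring2 := by intro hm; fin_cases hm <;> simp_all
  simp [scTierOf, h0, h1, h2]

theorem tierOf_chars (k l : Nat) :
    scTierOf (PySem.Int.toChars (k : Int) ++ PySem.Int.toChars (l : Int)) =
      (if ((k : Int), (l : Int)) ∈ scB_tier0 then some 0
       else if ((k : Int), (l : Int)) ∈ scB_tier1 then some 1
       else if ((k : Int), (l : Int)) ∈ scB_tier2 then some 2
       else none) := by
  by_cases hk : k < 10
  · by_cases hl : l < 10
    · exact (by decide :
        ∀ k' : Nat, k' < 10 → ∀ l' : Nat, l' < 10 →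
          scTierOf (PySem.Int.toChars (k' : Int) ++ PySem.Int.toChars (l' : Int)) =
            (if ((k' : Int), (l' : Int)) ∈ scB_tier0 then some 0
             else if ((k' : Int), (l' : Int)) ∈ scB_tier1 then some 1
             else if ((k' : Int), (l' : Int)) ∈ scB_tier2 then some 2
             else none)) k hk l hl
    · have hlen : 3 ≤ (PySem.Int.toChars (k : Int) ++ PySem.Int.toChars (l : Int)).length := by
        rw [List.length_append]
        have a1 := toChars_len1 k
        have b2 := toChars_len2 l (by omega)
        omega
      rw [tierOf_long _ hlen]
      have m0 : ((k : Int), (l : Int)) ∉ scB_tier0 := by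
        simp [scB_tier0, Prod.ext_iff]; omega
      have m1 : ((k : Int), (l : Int)) ∉ scB_tier1 := by
        simp [scB_tier1, Prod.ext_iff]; omega
      have m2 : ((k : Int), (l : Int)) ∉ scB_tier2 := by
        simp [scB_tier2, Prod.ext_iff]; omega
      simp [m0, m1, m2]
  · have hlen : 3 ≤ (PySem.Int.toChars (k : Int) ++ PySem.Int.toChars (l : Int)).length := by
      rw [List.length_append]
      have a1 := toChars_len1 l
      have b2 := toChars_len2 k (by omega)
      omega
    rw [tierOf_long _ hlen]
    have m0 : ((k : Int), (l : Int)) ∉ scB_tier0 := by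
      simp [scB_tier0, Prod.ext_iff]; omega
    have m1 : ((k : Int), (l : Int)) ∉ scB_tier1 := by
      simp [scB_tier1, Prod.ext_iff]; omega
    have m2 : ((k : Int), (l : Int)) ∉ scB_tier2 := by
      simp [scB_tier2, Prod.ext_iff]; omega
    simp [m0, m1, m2]

theorem tier_disj01 : ∀ x ∈ scB_tier0, x ∉ scB_tier1 := by decide
theorem tier_disj02 : ∀ x ∈ scB_tier0, x ∉ scB_tier2 := by decide
theorem tier_disj12 : ∀ x ∈ scB_tier1, x ∉ scB_tier2 := by decide

-- ---- turning the grid double sum into coordinate probes ----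

theorem scInner_sum (c : String) (b : Int) : ∀ (row : List String) (s : Int),
    ((PySem.List.enumerate row s).map (fun q => if q.1 = b ∧ q.2 = c then (1 : Int) else 0)).sum
    = if row[(b - s).toNat]? = some c ∧ s ≤ b then 1 else 0 := by
  intro row
  induction row with
  | nil => intro s; simp
  | cons x xs ih =>
    intro s
    rw [PySem.List.enumerate_cons, List.map_cons, List.sum_cons, ih (s + 1)]
    by_cases hb : s = b
    · subst hb
      have h1 : ¬ (s + 1 ≤ s) := by omega
      have h2 : (s - s).toNat = 0 := by omega
      simp [h1, h2]
    · by_cases hlt : s + 1 ≤ b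
      · have e : (b - s).toNat = (b - (s + 1)).toNat + 1 := by omega
        have h3 : s ≤ b := by omega
        simp [hb, e, hlt, h3, List.getElem?_cons_succ]
      · have h4 : ¬ (s ≤ b) := by omega
        simp [hb, hlt, h4]

theorem scGrid_single (c : String) (a b : Int) : ∀ (house : List (List String)) (s : Int),
    ((PySem.List.enumerate house s).map
      (fun p => ((PySem.List.enumerate p.2 0).map
        (fun q => if p.1 = a ∧ q.1 = b ∧ q.2 = c then (1 : Int) else 0)).sum)).sum
    = if (house[(a - s).toNat]?.bind (fun row => row[b.toNat]?)) = some c ∧ s ≤ a ∧ 0 ≤ b then 1 else 0 := by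
  intro house
  induction house with
  | nil => intro s; simp
  | cons x xs ih =>
    intro s
    rw [PySem.List.enumerate_cons, List.map_cons, List.sum_cons, ih (s + 1)]
    by_cases hsa : s = a
    · subst hsa
      have h1 : ¬ (s + 1 ≤ s) := by omega
      have h2 : (s - s).toNat = 0 := by omega
      have hhead : ((PySem.List.enumerate x 0).map
          (fun q => if s = s ∧ q.1 = b ∧ q.2 = c then (1 : Int) else 0)).sum
          = if x[(b - 0).toNat]? = some c ∧ (0 : Int) ≤ b then 1 else 0 := by
        rw [← scInner_sum c b x 0]
        apply congrArg List.sum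
        apply List.map_congr_left
        intro q _
        simp
      rw [hhead]
      simp only [h1, h2, and_false, if_false, add_zero, sub_zero, le_refl, and_true]
      split_ifs <;> simp_all
    · have hz : ((PySem.List.enumerate x 0).map
          (fun q => if s = a ∧ q.1 = b ∧ q.2 = c then (1 : Int) else 0)).sum = 0 := by
        apply List.sum_eq_zero
        intro v hv
        rcases List.mem_map.mp hv with ⟨q, -, rfl⟩
        simp [hsa]
      rw [hz, zero_add]
      by_cases hlt : s + 1 ≤ a
      · have e : (a - s).toNat = (a - (s + 1)).toNat + 1 := by omega
        have h3 : s ≤ a := by omega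
        simp [e, hlt, h3, List.getElem?_cons_succ]
      · have h4 : ¬ (s ≤ a) := by omega
        simp [hlt, h4]

theorem scGrid_mem (house : List (List String)) (c : String) :
    ∀ (L : List (Int × Int)), L.Nodup →
    ((PySem.List.enumerate house 0).map
      (fun p => ((PySem.List.enumerate p.2 0).map
        (fun q => if (p.1, q.1) ∈ L ∧ q.2 = c then (1 : Int) else 0)).sum)).sum
    = (L.map (fun r => if (house[r.1.toNat]?.bind (fun row => row[r.2.toNat]?)) = some c ∧ 0 ≤ r.1 ∧ 0 ≤ r.2 then (1 : Int) else 0)).sum := by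
  intro L
  induction L with
  | nil =>
    intro _
    simp only [List.not_mem_nil, false_and, if_false, List.map_nil, List.sum_nil]
    apply List.sum_eq_zero
    intro v hv
    rcases List.mem_map.mp hv with ⟨p, -, rfl⟩
    simp
  | cons r L' ih =>
    intro hnd
    have hr : r ∉ L' := (List.nodup_cons.mp hnd).1
    have hnd' := (List.nodup_cons.mp hnd).2
    have hsplit : ∀ (p : Int × List String) (q : Int × String),
        (if (p.1, q.1) ∈ r :: L' ∧ q.2 = c then (1 : Int) else 0)
        = (if (p.1 = r.1 ∧ q.1 = r.2 ∧ q.2 = c) then (1 : Int) else 0)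
          + (if (p.1, q.1) ∈ L' ∧ q.2 = c then (1 : Int) else 0) := by
      intro p q
      by_cases h1 : (p.1, q.1) = r <;> by_cases h2 : (p.1, q.1) ∈ L' <;>
        by_cases h3 : q.2 = c <;> simp_all [List.mem_cons, Prod.ext_iff]
    have houter : ((PySem.List.enumerate house 0).map
        (fun p => ((PySem.List.enumerate p.2 0).map
          (fun q => if (p.1, q.1) ∈ r :: L' ∧ q.2 = c then (1 : Int) else 0)).sum)).sum
        = ((PySem.List.enumerate house 0).map
          (fun p => ((PySem.List.enumerate p.2 0).map
              (fun q => if (p.1 = r.1 ∧ q.1 = r.2 ∧ q.2 = c) then (1 : Int) else 0)).sum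
            + ((PySem.List.enumerate p.2 0).map
              (fun q => if (p.1, q.1) ∈ L' ∧ q.2 = c then (1 : Int) else 0)).sum)).sum := by
      apply congrArg List.sum
      apply List.map_congr_left
      intro p _
      rw [← PySem.List.sum_map_add_int]
      apply congrArg List.sum
      apply List.map_congr_left
      intro q _
      exact hsplit p q
    rw [houter, PySem.List.sum_map_add_int, scGrid_single c r.1 r.2 house 0, ih hnd',
        List.map_cons, List.sum_cons]
    simp

theorem scB_cell_eq (house : List (List String)) (a b : Int) (ha : 0 ≤ a) (hb : 0 ≤ b) :
    scB_cell house a b = (house[a.toNat]?.bind (fun row => row[b.toNat]?)) := by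
  unfold scB_cell
  simp only [PySem.List.len_eq]
  by_cases h1 : a < (house.length : Int)
  · have hlt : a.toNat < house.length := by omega
    rw [if_pos h1, PySem.List.pyGetD_eq_getElem house [] ha (by exact_mod_cast h1),
        List.getElem?_eq_getElem hlt]
    simp only [Option.bind]
    by_cases h2 : b < ((house[a.toNat]).length : Int)
    · have hlt2 : b.toNat < (house[a.toNat]).length := by omega
      rw [if_pos h2, PySem.List.pyGetD_eq_getElem _ "" hb (by exact_mod_cast h2),
          List.getElem?_eq_getElem hlt2]
    · rw [if_neg h2]
      symm
      rw [List.getElem?_eq_none]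
      omega
  · rw [if_neg h1]
    symm
    have : house[a.toNat]? = none := by
      rw [List.getElem?_eq_none]
      omega
    rw [this]
    rfl

theorem scSum_eq (house : List (List String)) (t : Nat) (L : List (Int × Int)) (c : String)
    (hL : (t = 0 ∧ L = scB_tier0) ∨ (t = 1 ∧ L = scB_tier1) ∨ (t = 2 ∧ L = scB_tier2)) :
    scSum house t c = scB_count house L c := by
  have hnd : L.Nodup := by
    rcases hL with ⟨_, rfl⟩ | ⟨_, rfl⟩ | ⟨_, rfl⟩ <;> decide
  have h1 : scSum house t c =
      ((PySem.List.enumerate house 0).map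
        (fun p => ((PySem.List.enumerate p.2 0).map
          (fun q => if (p.1, q.1) ∈ L ∧ q.2 = c then (1 : Int) else 0)).sum)).sum := by
    unfold scSum scRowSum
    apply congrArg List.sum
    apply List.map_congr_left
    intro p hp
    apply congrArg List.sum
    apply List.map_congr_left
    intro q hq
    obtain ⟨kk, hk2, rfl⟩ := (PySem.List.mem_enumerate_iff _ _ _).mp hp
    obtain ⟨mm, hm2, rfl⟩ := (PySem.List.mem_enumerate_iff _ _ _).mp hq
    simp only [zero_add]
    unfold scInd
    rw [tierOf_chars kk mm]
    rcases hL with ⟨rfl, rfl⟩ | ⟨rfl, rfl⟩ | ⟨rfl, rfl⟩ <;>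
      (by_cases h0 : ((kk : Int), (mm : Int)) ∈ scB_tier0 <;>
       by_cases h1m : ((kk : Int), (mm : Int)) ∈ scB_tier1 <;>
       by_cases h2m : ((kk : Int), (mm : Int)) ∈ scB_tier2 <;>
       first
        | exact absurd h1m (tier_disj01 _ h0)
        | exact absurd h2m (tier_disj02 _ h0)
        | exact absurd h2m (tier_disj12 _ h1m)
        | simp [h0, h1m, h2m])
  rw [h1, scGrid_mem house c L hnd]
  unfold scB_count
  apply congrArg List.sum
  apply List.map_congr_left
  intro r hrL
  have hnn : 0 ≤ r.1 ∧ 0 ≤ r.2 := by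
    rcases hL with ⟨_, rfl⟩ | ⟨_, rfl⟩ | ⟨_, rfl⟩ <;> fin_cases hrL <;> decide
  rw [scB_cell_eq house r.1 r.2 hnn.1 hnn.2]
  simp [hnn.1, hnn.2]

theorem scB_count_nonneg (house : List (List String)) (L : List (Int × Int)) (c : String) :
    0 ≤ scB_count house L c := by
  unfold scB_count
  apply List.sum_nonneg
  intro x hx
  rcases List.mem_map.mp hx with ⟨p, -, rfl⟩
  split_ifs <;> omega

set_option maxHeartbeats 1000000 in
theorem decision_eq (r0 r1 r2 y0 y1 y2 : Int)
    (hr0 : 0 ≤ r0) (hr1 : 0 ≤ r1) (hr2 : 0 ≤ r2)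
    (hy0 : 0 ≤ y0) (hy1 : 0 ≤ y1) (hy2 : 0 ≤ y2) :
    (if r0 > y0 then
      let scores := r0
      let scores := if y1 = 0 then
          (if y2 = 0 then scores + r1 + r2 else scores + r1)
        else scores
      "R: " ++ PySem.Int.toStr scores
    else if y0 > r0 then
      let scores := y0
      let scores := if r1 = 0 then
          (if r2 = 0 then scores + y1 + y2 else scores + y1)
        else scores
      "Y: " ++ PySem.Int.toStr scores
    else if r1 > 0 ∧ y1 = 0 then
      let scores := if y2 = 0 then r1 + r2 else r1
      "R: " ++ PySem.Int.toStr scores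
    else if y1 > 0 ∧ r1 = 0 then
      let scores := if r2 = 0 then y1 + y2 else y1
      "Y: " ++ PySem.Int.toStr scores
    else if r2 > 0 ∧ y2 = 0 then
      "R: " ++ PySem.Int.toStr r2
    else if y2 > 0 ∧ r2 = 0 then
      "Y: " ++ PySem.Int.toStr y2
    else
      "No points awarded") =
    (match scB_attempt (r0, r1, r2) (y0, y1, y2) with
    | some s => "R: " ++ PySem.Int.toStr s
    | none =>
      match scB_attempt (y0, y1, y2) (r0, r1, r2) with
      | some s => "Y: " ++ PySem.Int.toStr s
      | none => "No points awarded") := by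
  have E0 : PySem.List.pyRange 1 3 1 = [1, 2] := by decide
  have E1 : PySem.List.pyRange 2 3 1 = [2] := by decide
  have E2 : PySem.List.pyRange 3 3 1 = [] := by decide
  unfold scB_attempt
  rcases lt_trichotomy r0 y0 with hcmp | hcmp | hcmp
  · have hne : ¬ r0 = y0 := by omega
    have hngt : ¬ y0 < r0 := by omega
    rcases eq_or_lt_of_le hr1 with h1e | h1p <;> rcases eq_or_lt_of_le hr2 with h2e | h2p <;>
      (try subst h1e) <;> (try subst h2e) <;>
      simp_all [E0, E1, E2, scB_idx, gt_iff_lt, List.foldl_cons, List.foldl_nil] <;>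
      first
        | rfl
        | omega
        | (congr 1 <;> omega)
        | (split_ifs <;> first | rfl | omega | (congr 1 <;> omega) | simp_all)
        | simp_all
  · subst hcmp
    rcases eq_or_lt_of_le hr1 with h1e | h1p <;> rcases eq_or_lt_of_le hr2 with h2e | h2p <;>
    rcases eq_or_lt_of_le hy1 with h3e | h3p <;> rcases eq_or_lt_of_le hy2 with h4e | h4p <;>
      (try subst h1e) <;> (try subst h2e) <;> (try subst h3e) <;> (try subst h4e) <;>
      simp_all [E0, E1, E2, scB_idx, gt_iff_lt, List.foldl_cons, List.foldl_nil] <;>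
      first
        | rfl
        | omega
        | (congr 1 <;> omega)
        | (split_ifs <;> first | rfl | omega | (congr 1 <;> omega) | simp_all)
        | simp_all
  · have hne : ¬ r0 = y0 := by omega
    have hnlt : ¬ r0 < y0 := by omega
    rcases eq_or_lt_of_le hy1 with h3e | h3p <;> rcases eq_or_lt_of_le hy2 with h4e | h4p <;>
      (try subst h3e) <;> (try subst h4e) <;>
      simp_all [E0, E1, E2, scB_idx, gt_iff_lt, List.foldl_cons, List.foldl_nil] <;>
      first
        | rfl
        | omega
        | (congr 1 <;> omega)
        | (split_ifs <;> first | rfl | omega | (congr 1 <;> omega) | simp_all)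
        | simp_all

-- ===== VERDICT =====
theorem score_curling_spec : Claim_equal_score_curling := by
  intro house _
  unfold Spec_score_curling score_curling score_curling_alt
  rw [counts_enum house, tally_eq house]
  rw [scSum_eq house 0 scB_tier0 "R" (Or.inl ⟨rfl, rfl⟩),
      scSum_eq house 1 scB_tier1 "R" (Or.inr (Or.inl ⟨rfl, rfl⟩)),
      scSum_eq house 2 scB_tier2 "R" (Or.inr (Or.inr ⟨rfl, rfl⟩)),
      scSum_eq house 0 scB_tier0 "Y" (Or.inl ⟨rfl, rfl⟩),
      scSum_eq house 1 scB_tier1 "Y" (Or.inr (Or.inl ⟨rfl, rfl⟩)),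
      scSum_eq house 2 scB_tier2 "Y" (Or.inr (Or.inr ⟨rfl, rfl⟩))]
  exact decision_eq _ _ _ _ _ _
    (scB_count_nonneg house scB_tier0 "R") (scB_count_nonneg house scB_tier1 "R")
    (scB_count_nonneg house scB_tier2 "R") (scB_count_nonneg house scB_tier0 "Y")
    (scB_count_nonneg house scB_tier1 "Y") (scB_count_nonneg house scB_tier2 "Y")
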